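-- pv_equiv track=rewrite | github.com/anshp1108/code_review_assistant | code-review-assistant/models/llm_integration.py | generate_fallback_review
-- ===== SOURCE A (Python) =====
-- from typing import Dict, Any
--
-- def generate_fallback_review(code_content: str, filename: str) -> Dict[str, Any]:
--     """Generate a basic review when LLM is unavailable."""
--     lines = code_content.split('\n')
--
--     basic_feedback = []
--
--     # Basic checks
--     if len(lines) > 100:
--         basic_feedback.append("File is quite large (>100 lines). Consider splitting into smaller modules.")
--
--     long_lines = [i+1 for i, line in enumerate(lines) if len(line) > 80]
--     if long_lines:
--         basic_feedback.append(f"Lines {', '.join(map(str, long_lines[:5]))} are too long (>80 characters).")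
--
--     # Check for basic patterns
--     if '# TODO' in code_content or '// TODO' in code_content:
--         basic_feedback.append("TODO comments found - consider addressing them.")
--
--     if not basic_feedback:
--         basic_feedback.append("No obvious issues detected in basic analysis.")
--
--     return {
--         'review_text': '\n'.join(basic_feedback),
--         'type': 'fallback_review',
--         'note': 'Basic analysis performed - LLM review unavailable'
--     }
-- ===== SOURCE B (Python) =====
-- def generate_fallback_review(code_content: str, filename: str):
--     """Basic review via a character-level state machine: no split(), no line list.
--
--     One scan over the raw string tracks the current line number and the running
--     length of the current line; a line number is recorded the instant its length
--     reaches 81 characters, so each long line is recorded exactly once, in order.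
--     """
--     line_no = 1
--     cur_len = 0
--     long_lines = []
--     for ch in code_content:
--         if ch == '\n':
--             line_no += 1
--             cur_len = 0
--         else:
--             cur_len += 1
--             if cur_len == 81:
--                 long_lines.append(line_no)
--
--     feedback = []
--     if line_no > 100:
--         feedback.append("File is quite large (>100 lines). Consider splitting into smaller modules.")
--     if long_lines:
--         feedback.append(f"Lines {', '.join(map(str, long_lines[:5]))} are too long (>80 characters).")
--     if '# TODO' in code_content or '// TODO' in code_content:
--         feedback.append("TODO comments found - consider addressing them.")
--     review = '\n'.join(feedback) if feedback else "No obvious issues detected in basic analysis."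
--     return {
--         'review_text': review,
--         'type': 'fallback_review',
--         'note': 'Basic analysis performed - LLM review unavailable'
--     }
-- ===== Notes on version B (the rewrite author's own statement) =====
-- stated objective: alternative
-- what changed: B never builds the line list: a character-level state machine scans the raw string once, tracking the current line number and running line length, and records a line number the instant the length reaches 81; A instead splits into lines and runs a comprehension over enumerate(lines).
import Mathlib
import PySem

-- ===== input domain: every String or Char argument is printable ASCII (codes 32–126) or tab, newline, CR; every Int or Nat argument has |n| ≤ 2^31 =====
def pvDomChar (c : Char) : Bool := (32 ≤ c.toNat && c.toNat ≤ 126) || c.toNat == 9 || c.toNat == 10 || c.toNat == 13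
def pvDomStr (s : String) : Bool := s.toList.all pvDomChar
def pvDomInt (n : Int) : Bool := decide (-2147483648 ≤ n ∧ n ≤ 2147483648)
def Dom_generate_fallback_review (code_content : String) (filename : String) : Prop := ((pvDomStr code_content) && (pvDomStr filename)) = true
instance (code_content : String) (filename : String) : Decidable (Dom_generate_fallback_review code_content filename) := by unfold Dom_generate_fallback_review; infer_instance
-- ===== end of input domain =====

-- B replaces A's split-into-lines + comprehension over enumerate(lines) by a character-level state
-- machine: one scan over the raw string tracking line number and running line length, recording a
-- line number the instant the length reaches 81; same returned dict (objective: alternative).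

-- ===== PORT A =====
def generate_fallback_review (code_content : String) (filename : String) : List (String × String) :=
  let lines := (PySem.Str.split? code_content "\n").getD []
  let basic_feedback : List String := []
  let basic_feedback := if PySem.List.len lines > 100 then
      basic_feedback ++ ["File is quite large (>100 lines). Consider splitting into smaller modules."]
    else basic_feedback
  let long_lines : List Int :=
    ((PySem.List.enumerate lines).filter (fun p => PySem.Str.len p.2 > 80)).map (fun p => p.1 + 1)
  let basic_feedback := if long_lines ≠ [] then
      basic_feedback ++ ["Lines " ++ PySem.Str.join ", " ((PySem.List.slice long_lines none (some 5)).map PySem.Int.toStr) ++ " are too long (>80 characters)."]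
    else basic_feedback
  let basic_feedback := if PySem.Str.isIn "# TODO" code_content || PySem.Str.isIn "// TODO" code_content then
      basic_feedback ++ ["TODO comments found - consider addressing them."]
    else basic_feedback
  let basic_feedback := if basic_feedback = [] then ["No obvious issues detected in basic analysis."] else basic_feedback
  [("review_text", PySem.Str.join "\n" basic_feedback),
   ("type", "fallback_review"),
   ("note", "Basic analysis performed - LLM review unavailable")]

-- ===== PORT B =====
-- Source B's loop body: (line_no, cur_len, long_lines) updated per character
def pvScan (st : Int × Int × List Int) (ch : Char) : Int × Int × List Int :=
  if ch = '\n' then (st.1 + 1, 0, st.2.2)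
  else
    let k := st.2.1 + 1
    (st.1, k, if k = 81 then st.2.2 ++ [st.1] else st.2.2)

def generate_fallback_review_alt (code_content : String) (filename : String) : List (String × String) :=
  let st := code_content.toList.foldl pvScan (1, 0, [])
  let line_no := st.1
  let long_lines := st.2.2
  let feedback : List String := []
  let feedback := if line_no > 100 then
      feedback ++ ["File is quite large (>100 lines). Consider splitting into smaller modules."]
    else feedback
  let feedback := if long_lines ≠ [] then
      feedback ++ ["Lines " ++ PySem.Str.join ", " ((PySem.List.slice long_lines none (some 5)).map PySem.Int.toStr) ++ " are too long (>80 characters)."]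
    else feedback
  let feedback := if PySem.Str.isIn "# TODO" code_content || PySem.Str.isIn "// TODO" code_content then
      feedback ++ ["TODO comments found - consider addressing them."]
    else feedback
  let review := if feedback ≠ [] then PySem.Str.join "\n" feedback else "No obvious issues detected in basic analysis."
  [("review_text", review),
   ("type", "fallback_review"),
   ("note", "Basic analysis performed - LLM review unavailable")]

-- ===== PRECONDITION & SPEC =====
def Spec_generate_fallback_review (code_content : String) (filename : String) (out : List (String × String)) : Prop := out = generate_fallback_review_alt code_content filename
instance (code_content : String) (filename : String) (out : List (String × String)) : Decidable (Spec_generate_fallback_review code_content filename out) := by unfold Spec_generate_fallback_review; infer_instance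

-- ===== CLAIM (what is proved, stated in full; the proofs are below) =====
def Claim_equal_generate_fallback_review : Prop := ∀ (code_content : String) (filename : String), Dom_generate_fallback_review code_content filename → Spec_generate_fallback_review code_content filename (generate_fallback_review code_content filename)

-- ===== LEMMAS AND PROOFS =====

theorem pv_modifyHead_id {α : Type} (L : List (List α)) : List.modifyHead (fun x => x) L = L := by cases L <;> simp

theorem pv_splitOn_go_single (c : Char) (l : List Char) (fuel : Nat) (hf : l.length ≤ fuel)
    (cur : List Char) (acc : List (List Char)) :
    PySem.Chars.splitOn.go [c] fuel l cur acc
      = acc.reverse ++ (l.splitOn c).modifyHead (cur.reverse ++ ·) := by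
  induction l generalizing fuel cur acc with
  | nil =>
      rw [PySem.Chars.splitOn.go.eq_def]
      cases fuel <;> simp [List.splitOn, List.splitOnP_nil]
  | cons a t ih =>
      cases fuel with
      | zero => simp at hf
      | succ m =>
        rw [PySem.Chars.splitOn.go.eq_def]
        have hlen : t.length ≤ m := by simpa using hf
        by_cases hac : a = c
        · subst hac
          simp only [List.isPrefixOf, BEq.rfl, Bool.true_and, if_pos]
          simp only [List.length_cons, List.length_nil, List.drop_succ_cons, List.drop_zero]
          rw [ih m hlen [] (cur.reverse :: acc)]
          simp [List.splitOn, List.splitOnP_cons, pv_modifyHead_id]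
        · have hba : ((c == a) = false) := by simp; exact fun h => hac h.symm
          simp only [List.isPrefixOf, hba, Bool.false_and, if_neg, Bool.false_eq_true,
            not_false_iff]
          rw [ih m hlen (a :: cur) acc]
          have hne := List.splitOnP_ne_nil (fun x => x == c) t
          obtain ⟨h, rest, hr⟩ : ∃ h rest, t.splitOnP (fun x => x == c) = h :: rest := by
            cases hh : t.splitOnP (fun x => x == c) with
            | nil => exact absurd hh hne
            | cons h rest => exact ⟨h, rest, rfl⟩
          simp [List.splitOn, List.splitOnP_cons, hac, hr]

theorem pv_splitOn_single (c : Char) (s : List Char) :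
    PySem.Chars.splitOn s [c] = s.splitOn c := by
  have := pv_splitOn_go_single c s (s.length + 1) (by omega) [] []
  simpa [PySem.Chars.splitOn, pv_modifyHead_id] using this

theorem pv_split?_eq (s : String) :
    PySem.Str.split? s "\n" = some ((s.toList.splitOn '\n').map String.ofList) := by
  rw [PySem.Str.split?]
  have h2 : ("\n" : String).toList = ['\n'] := by decide
  rw [h2, PySem.Chars.split?]
  simp [pv_splitOn_single]

-- members of splitOn contain no separator
theorem pv_splitOn_not_mem (c : Char) (s : List Char) :
    ∀ l ∈ s.splitOn c, c ∉ l := by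
  induction s with
  | nil => simp [List.splitOn, List.splitOnP_nil]
  | cons a t ih =>
      intro l hl
      by_cases hac : a = c
      · subst hac
        simp only [List.splitOn, List.splitOnP_cons, BEq.rfl, if_pos] at hl
        rcases List.mem_cons.mp hl with rfl | hl
        · simp
        · exact ih l hl
      · obtain ⟨h, rest, hr⟩ : ∃ h rest, t.splitOn c = h :: rest := by
          have hne := List.splitOnP_ne_nil (fun x => x == c) t
          cases hh : t.splitOnP (fun x => x == c) with
          | nil => exact absurd hh hne
          | cons h rest => exact ⟨h, rest, by simp [List.splitOn, hh]⟩
        simp only [List.splitOn, List.splitOnP_cons] at hl hr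
        rw [show ((a == c) = false) by simpa using hac] at hl
        simp only [if_neg, Bool.false_eq_true, not_false_iff, hr, List.modifyHead_cons] at hl
        rcases List.mem_cons.mp hl with rfl | hl
        · intro hc
          rcases List.mem_cons.mp hc with rfl | hc
          · exact hac rfl
          · exact ih h (by rw [List.splitOn, hr]; exact List.mem_cons_self) hc
        · exact ih l (by rw [List.splitOn, hr]; exact List.mem_cons_of_mem _ hl)

-- scanning one newline-free line from running length k
theorem pv_scan_line (l : List Char) (hnl : '\n' ∉ l) : ∀ (n k : Int) (acc : List Int),
    l.foldl pvScan (n, k, acc)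
      = (n, k + l.length, acc ++ if k ≤ 80 ∧ 80 < k + l.length then [n] else []) := by
  induction l with
  | nil => intro n k acc; simp
  | cons a t ih =>
      intro n k acc
      have ha : a ≠ '\n' := fun h => hnl (h ▸ List.mem_cons_self)
      have ht : '\n' ∉ t := fun h => hnl (List.mem_cons_of_mem _ h)
      rw [List.foldl_cons]
      show List.foldl pvScan (pvScan (n, k, acc) a) t = _
      rw [show pvScan (n, k, acc) a
          = (n, k + 1, if k + 1 = 81 then acc ++ [n] else acc) by
        simp [pvScan, ha]]
      have e2 : k + 1 + (t.length : Int) = k + ((t.length : Int) + 1) := by omega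
      have hnn : (0:Int) ≤ (t.length : Int) := by positivity
      by_cases hk : k + 1 = 81
      · rw [if_pos hk, ih ht n (k + 1) (acc ++ [n])]
        simp only [List.length_cons, Nat.cast_add, Nat.cast_one, e2]
        rw [if_neg (by omega), if_pos ⟨by omega, by omega⟩]
        simp
      · rw [if_neg hk, ih ht n (k + 1) acc]
        simp only [List.length_cons, Nat.cast_add, Nat.cast_one, e2]
        split_ifs with h1 h2 h2 <;> first | rfl | (exfalso; omega)

-- scanning the intercalation of newline-free lines
theorem pv_scan_lines (L : List (List Char)) (hne : L ≠ []) (hnl : ∀ l ∈ L, '\n' ∉ l) :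
    ∀ (n : Int) (acc : List Int),
    (List.intercalate ['\n'] L).foldl pvScan (n, 0, acc)
      = (n + L.length - 1,
         ((L.getLast hne).length : Int),
         acc ++ ((PySem.List.enumerate L n).filter (fun p => 80 < (p.2.length : Int))).map (fun p => p.1)) := by
  induction L with
  | nil => exact absurd rfl hne
  | cons l L ih =>
      intro n acc
      cases L with
      | nil =>
          rw [show List.intercalate ['\n'] [l] = l by simp [List.intercalate]]
          rw [pv_scan_line l (hnl l List.mem_cons_self) n 0 acc]
          simp only [PySem.List.enumerate_cons, PySem.List.enumerate_nil]
          refine Prod.ext (by simp) (Prod.ext (by simp) ?_)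
          simp only [List.filter_cons, List.filter_nil]
          by_cases h : 80 < (l.length : Int)
          · rw [if_pos ⟨by omega, by simpa using h⟩]
            simp [h]
          · rw [if_neg (by push_cast; omega)]
            simp only [decide_eq_true_eq]
            rw [if_neg h]
            simp
      | cons l2 L2 =>
          have hint : List.intercalate ['\n'] (l :: l2 :: L2)
              = l ++ '\n' :: List.intercalate ['\n'] (l2 :: L2) := by
            simp [List.intercalate, List.intersperse_cons₂]
          rw [hint, List.foldl_append,
            pv_scan_line l (hnl l List.mem_cons_self) n 0 acc, List.foldl_cons]
          have hstep : ∀ (st : Int × Int × List Int), pvScan st '\n' = (st.1 + 1, 0, st.2.2) := by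
            intro st; simp [pvScan]
          rw [hstep]
          rw [ih (by simp) (fun x hx => hnl x (List.mem_cons_of_mem _ hx)) (n + 1) _]
          refine Prod.ext (by simp; omega) (Prod.ext ?_ ?_)
          · simp [List.getLast]
          · simp only [PySem.List.enumerate_cons, List.filter_cons]
            by_cases h : 80 < (l.length : Int)
            · rw [if_pos ⟨by omega, by simpa using h⟩]
              simp only [decide_eq_true_eq, if_pos h, List.map_cons]
              simp
            · rw [if_neg (by push_cast; omega)]
              simp only [decide_eq_true_eq]
              rw [if_neg h]
              simp

theorem pv_Along (L : List (List Char)) : ∀ (n : Int),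
    ((PySem.List.enumerate (L.map String.ofList) n).filter
        (fun p => PySem.Str.len p.2 > 80)).map (fun p => p.1 + 1)
      = ((PySem.List.enumerate L (n + 1)).filter
            (fun p => 80 < (p.2.length : Int))).map (fun p => p.1) := by
  induction L with
  | nil => intro n; simp [PySem.List.enumerate_nil]
  | cons l L ih =>
      intro n
      simp only [List.map_cons, PySem.List.enumerate_cons, List.filter_cons]
      have hl : (decide (PySem.Str.len (String.ofList l) > 80))
          = (decide (80 < (l.length : Int))) := by
        simp [PySem.Str.len_eq]
      by_cases h : 80 < (l.length : Int)
      · rw [show (decide (PySem.Str.len (String.ofList l) > 80)) = true by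
          rw [hl]; simpa using h]
        rw [show (decide (80 < (l.length : Int))) = true by simpa using h]
        simp only [if_pos, List.map_cons]
        rw [ih (n + 1)]
      · rw [show (decide (PySem.Str.len (String.ofList l) > 80)) = false by
          rw [hl]; simpa using h]
        rw [show (decide (80 < (l.length : Int))) = false by simpa using h]
        simp only [Bool.false_eq_true, if_neg, not_false_iff]
        exact ih (n + 1)

theorem pv_join_singleton (sep p : String) : PySem.Str.join sep [p] = p := by
  rw [PySem.Str.join]
  simp [PySem.Chars.join_singleton]

theorem pv_final (P : List String) (d : String) :
    PySem.Str.join "\n" (if P = [] then [d] else P)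
      = (if P ≠ [] then PySem.Str.join "\n" P else d) := by
  by_cases h : P = [] <;> simp [h, pv_join_singleton]

-- ===== VERDICT (by name: the statement is the Claim_ definition above) =====
theorem generate_fallback_review_spec : Claim_equal_generate_fallback_review := by
  intro code_content filename _
  show generate_fallback_review code_content filename = generate_fallback_review_alt code_content filename
  simp only [generate_fallback_review, generate_fallback_review_alt, pv_split?_eq,
    Option.getD_some]
  set Ls := code_content.toList.splitOn '\n' with hLs
  have hne : Ls ≠ [] := by
    rw [hLs, List.splitOn]
    exact List.splitOnP_ne_nil _ _
  have hnl : ∀ l ∈ Ls, '\n' ∉ l := pv_splitOn_not_mem '\n' code_content.toList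
  have hcontent : code_content.toList = List.intercalate ['\n'] Ls := by
    rw [hLs, List.intercalate_splitOn]
  rw [hcontent, pv_scan_lines Ls hne hnl 1 []]
  dsimp only
  have hlen : PySem.List.len (Ls.map String.ofList) = 1 + (Ls.length : Int) - 1 := by
    rw [PySem.List.len_eq]; simp
  rw [hlen, pv_Along Ls 0, show (0:Int) + 1 = 1 from by norm_num]
  simp only [List.nil_append]
  rw [pv_final]
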